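-- pv_equiv track=rewrite | github.com/nvadulas/srdesign | d.py | dominant_zone
-- ===== SOURCE A (Python) =====
-- DELTA_THRESHOLD  = 80    # mm drop from baseline to count as hand present
--
-- DOMINANCE_MM     = 60    # how much more drop the winner needs vs others
--
-- def dominant_zone(deltas):
--     """
--     Find zone with the largest delta that also beats all others by DOMINANCE_MM.
--     """
--     # Flatten
--     flat = {}
--     for r in range(3):
--         for c in range(3):
--             d = deltas[r][c]
--             if d >= DELTA_THRESHOLD:
--                 flat[(r, c)] = d
--
--     if not flat:
--         return None
--
--     winner = max(flat, key=flat.get)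
--     winner_delta = flat[winner]
--
--     others = {k: v for k, v in flat.items() if k != winner}
--     if all(winner_delta > v + DOMINANCE_MM for v in others.values()):
--         return winner
--
--     # If no single dominant zone, return None
--     return None
-- ===== SOURCE B (Python) =====
-- DELTA_THRESHOLD  = 80    # mm drop from baseline to count as hand present
--
-- DOMINANCE_MM     = 60    # how much more drop the winner needs vs others
--
-- def dominant_zone(deltas):
--     """
--     Find zone with the largest delta that also beats all others by DOMINANCE_MM.
--     Single extremum-tracking pass: best (strict '>' so the first maximum wins),
--     the runner-up delta, and how many cells reached the threshold.
--     """
--     best = None          # (delta, r, c) of the current leader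
--     second = None        # largest above-threshold delta besides the leader
--     count = 0
--     for r in range(3):
--         for c in range(3):
--             d = deltas[r][c]
--             if d < DELTA_THRESHOLD:
--                 continue
--             count += 1
--             if best is None:
--                 best = (d, r, c)
--             elif d > best[0]:
--                 second = best[0]
--                 best = (d, r, c)
--             elif second is None or d > second:
--                 second = d
--     if count == 0:
--         return None
--     if count == 1:
--         return (best[1], best[2])
--     if best[0] > second + DOMINANCE_MM:
--         return (best[1], best[2])
--     return None
-- ===== Notes on version B (the rewrite author's own statement) =====
-- stated objective: simpler
-- what changed: Replaces the dict build + max(key=...) + others-dict comprehension + all() generator with a single pass over the 9 cells tracking the leader (strict '>' so the first maximum wins), the runner-up delta and a count of above-threshold cells.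
import Mathlib
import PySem

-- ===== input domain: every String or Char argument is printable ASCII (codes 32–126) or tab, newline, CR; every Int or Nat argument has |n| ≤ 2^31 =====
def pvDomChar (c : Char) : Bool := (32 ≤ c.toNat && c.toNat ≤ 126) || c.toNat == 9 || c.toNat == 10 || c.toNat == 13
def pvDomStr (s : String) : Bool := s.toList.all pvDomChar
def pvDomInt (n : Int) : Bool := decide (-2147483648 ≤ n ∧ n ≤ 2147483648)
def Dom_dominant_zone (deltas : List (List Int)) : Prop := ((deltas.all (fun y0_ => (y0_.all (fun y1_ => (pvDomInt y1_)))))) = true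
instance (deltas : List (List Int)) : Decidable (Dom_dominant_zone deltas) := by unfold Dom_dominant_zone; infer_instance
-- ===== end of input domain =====

-- B replaces A's dict build + max(key=…) + others-filter + all() by one extremum-tracking
-- pass over the 9 cells (leader, runner-up delta, above-threshold count); objective: simpler.


-- ===== PORT A =====
-- deltas[r][c]: Pre_ keeps both indices in range, so the `.getD` defaults are never reached.
def pvCellA (deltas : List (List Int)) (r c : Int) : Int :=
  (PySem.List.pyGet? ((PySem.List.pyGet? deltas r).getD []) c).getD 0

def dominant_zone (deltas : List (List Int)) : Option (Int × Int) :=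
  let flat : PySem.Dict (Int × Int) Int :=
    (PySem.List.pyRange 0 3 1).foldl (fun fl r =>
      (PySem.List.pyRange 0 3 1).foldl (fun fl c =>
        let d := pvCellA deltas r c
        if 80 ≤ d then fl.insert (r, c) d else fl) fl) PySem.Dict.empty
  if flat.size = 0 then none
  else
    match PySem.List.max? flat.keys (fun k => flat.getD k 0) with
    | none => none            -- unreachable: flat is nonempty here
    | some winner =>
      let winner_delta := flat.getD winner 0
      let others := flat.items.filter (fun kv => decide (kv.1 ≠ winner))
      if others.all (fun kv => decide (winner_delta > kv.2 + 60)) then some winner else none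

-- ===== PORT B =====
-- state = (best : Option (delta, r, c), second : Option delta, count)
def pvStepB (st : Option (Int × Int × Int) × Option Int × Int) (r c d : Int) :
    Option (Int × Int × Int) × Option Int × Int :=
  if d < 80 then st
  else
    match st with
    | (none, second, count) => (some (d, r, c), second, count + 1)
    | (some (bd, br, bc), second, count) =>
      if d > bd then (some (d, r, c), some bd, count + 1)
      else
        match second with
        | none => (some (bd, br, bc), some d, count + 1)
        | some s => (some (bd, br, bc), some (if d > s then d else s), count + 1)

def dominant_zone_alt (deltas : List (List Int)) : Option (Int × Int) :=
  let st :=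
    (PySem.List.pyRange 0 3 1).foldl (fun st r =>
      (PySem.List.pyRange 0 3 1).foldl (fun st c =>
        pvStepB st r c (pvCellA deltas r c)) st) (none, none, 0)
  if st.2.2 = 0 then none
  else
    match st.1 with
    | none => none            -- unreachable: count ≠ 0 means best was set
    | some (bd, br, bc) =>
      if st.2.2 = 1 then some (br, bc)
      else
        match st.2.1 with
        | none => none        -- unreachable: count ≥ 2 means second was set
        | some s => if bd > s + 60 then some (br, bc) else none

-- ===== PRECONDITION & SPEC =====
-- Pre_ excludes exactly the inputs on which A raises IndexError: fewer than 3 rows,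
-- or one of the first 3 rows shorter than 3.
def Pre_dominant_zone (deltas : List (List Int)) : Prop :=
  3 ≤ deltas.length ∧ ∀ row ∈ deltas.take 3, 3 ≤ row.length
instance (deltas : List (List Int)) : Decidable (Pre_dominant_zone deltas) := by
  unfold Pre_dominant_zone; infer_instance

def pvWitness_dominant_zone : List (List Int) := [[100, 0, 0], [0, 0, 0], [0, 0, 0]]

def Spec_dominant_zone (deltas : List (List Int)) (out : Option (Int × Int)) : Prop := out = dominant_zone_alt deltas
instance (deltas : List (List Int)) (out : Option (Int × Int)) : Decidable (Spec_dominant_zone deltas out) := by unfold Spec_dominant_zone; infer_instance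

-- ===== CLAIM (what is proved, stated in full; the proofs are below) =====
def Claim_equal_dominant_zone : Prop := ∀ (deltas : List (List Int)), Dom_dominant_zone deltas → Pre_dominant_zone deltas → Spec_dominant_zone deltas (dominant_zone deltas)


-- ===== LEMMAS AND PROOFS =====

-- The nine cells of the grid, in A's and B's common traversal order.
def pvCells (deltas : List (List Int)) : List ((Int × Int) × Int) :=
  [((0, 0), pvCellA deltas 0 0), ((0, 1), pvCellA deltas 0 1), ((0, 2), pvCellA deltas 0 2),
   ((1, 0), pvCellA deltas 1 0), ((1, 1), pvCellA deltas 1 1), ((1, 2), pvCellA deltas 1 2),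
   ((2, 0), pvCellA deltas 2 0), ((2, 1), pvCellA deltas 2 1), ((2, 2), pvCellA deltas 2 2)]

-- A's body as a function of the cell list (definitionally what `dominant_zone` does).
def pvAfold (xs : List ((Int × Int) × Int)) : Option (Int × Int) :=
  let flat : PySem.Dict (Int × Int) Int :=
    xs.foldl (fun fl kv => if 80 ≤ kv.2 then fl.insert kv.1 kv.2 else fl) PySem.Dict.empty
  if flat.size = 0 then none
  else
    match PySem.List.max? flat.keys (fun k => flat.getD k 0) with
    | none => none
    | some winner =>
      let winner_delta := flat.getD winner 0
      let others := flat.items.filter (fun kv => decide (kv.1 ≠ winner))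
      if others.all (fun kv => decide (winner_delta > kv.2 + 60)) then some winner else none

-- B's body as a function of the cell list.
def pvBfold (xs : List ((Int × Int) × Int)) : Option (Int × Int) :=
  let st := xs.foldl (fun st kv => pvStepB st kv.1.1 kv.1.2 kv.2) (none, none, 0)
  if st.2.2 = 0 then none
  else
    match st.1 with
    | none => none
    | some (bd, br, bc) =>
      if st.2.2 = 1 then some (br, bc)
      else
        match st.2.1 with
        | none => none
        | some s => if bd > s + 60 then some (br, bc) else none

-- what B's loop state is after any above-threshold cell list
def pvBState (ys : List ((Int × Int) × Int)) : Option (Int × Int × Int) × Option Int × Int :=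
  match PySem.List.max? ys (fun kv => kv.2) with
  | none => (none, none, 0)
  | some w => (some (w.2, w.1.1, w.1.2),
               PySem.List.max? ((ys.map Prod.snd).erase w.2) (fun v => v),
               (ys.length : Int))

lemma pvMax?_map {alpha beta : Type} (f : alpha -> beta) (key : beta -> Int) (l : List alpha) :
    PySem.List.max? (l.map f) key = (PySem.List.max? l (fun x => key (f x))).map f := by
  have H : ∀ (l : List alpha) (acc : Option alpha),
      (l.map f).foldl
        (fun acc x => match acc with
          | none => some x
          | some m => if key m < key x then some x else some m) (acc.map f)
      = (l.foldl
          (fun acc x => match acc with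
            | none => some x
            | some m => if key (f m) < key (f x) then some x else some m) acc).map f := by
    intro l
    induction l with
    | nil => intro acc; rfl
    | cons y ys ih =>
      intro acc
      cases acc with
      | none => simpa using ih (some y)
      | some m =>
        simp only [List.map_cons, List.foldl_cons, Option.map_some]
        by_cases h : key (f m) < key (f y)
        · simpa [h] using ih (some y)
        · simpa [h] using ih (some m)
  simpa [PySem.List.max?] using H l none

lemma pvMax?_congr {alpha : Type} (k1 k2 : alpha -> Int) (l : List alpha)
    (h : ∀ x ∈ l, k1 x = k2 x) :
    PySem.List.max? l k1 = PySem.List.max? l k2 := by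
  have H : ∀ (l : List alpha) (acc : Option alpha), (∀ x ∈ l, k1 x = k2 x) →
      (∀ m, acc = some m → k1 m = k2 m) →
      l.foldl
        (fun acc x => match acc with
          | none => some x
          | some m => if k1 m < k1 x then some x else some m) acc
      = l.foldl
          (fun acc x => match acc with
            | none => some x
            | some m => if k2 m < k2 x then some x else some m) acc := by
    intro l
    induction l with
    | nil => intro acc _ _; rfl
    | cons y ys ih =>
      intro acc hl hacc
      have hy : k1 y = k2 y := hl y (by simp)
      have htl : ∀ x ∈ ys, k1 x = k2 x := fun x hx => hl x (by simp [hx])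
      cases acc with
      | none =>
        simp only [List.foldl_cons]
        exact ih (some y) htl (by rintro m rfl_; simp_all)
      | some m =>
        have hm : k1 m = k2 m := hacc m rfl
        simp only [List.foldl_cons]
        by_cases h : k1 m < k1 y
        · rw [show (if k1 m < k1 y then some y else some m) = some y from by simp [h],
              show (if k2 m < k2 y then some y else some m) = some y from by
                rw [← hy, ← hm]; simp [h]]
          exact ih (some y) htl (by rintro m' hm'; cases hm'; exact hy)
        · rw [show (if k1 m < k1 y then some y else some m) = some m from by simp [h],
              show (if k2 m < k2 y then some y else some m) = some m from by
                rw [← hy, ← hm]; simp [h]]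
          exact ih (some m) htl (by rintro m' hm'; cases hm'; exact hm)
  exact H l none h (by simp)

lemma pvMax?_append {alpha : Type} (key : alpha -> Int) (l : List alpha) (x : alpha) :
    PySem.List.max? (l ++ [x]) key
      = match PySem.List.max? l key with
        | none => some x
        | some m => if key m < key x then some x else some m := by
  simp only [PySem.List.max?, List.foldl_append, List.foldl_cons, List.foldl_nil]
  rfl

lemma pvMax?_decomp {alpha : Type} (key : alpha -> Int) (l : List alpha) (m : alpha)
    (h : PySem.List.max? l key = some m) :
    ∃ l1 l2, l = l1 ++ m :: l2 ∧ (∀ x ∈ l1, key x < key m) ∧ (∀ x ∈ l2, key x ≤ key m) := by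
  induction l using List.reverseRecOn generalizing m with
  | nil => simp [PySem.List.max?] at h
  | append_singleton l x ih =>
    rw [pvMax?_append] at h
    cases hm : PySem.List.max? l key with
    | none =>
      rw [hm] at h
      obtain rfl : x = m := by simpa using h
      refine ⟨[], [], by simp [(PySem.List.max?_eq_none_iff l key).mp hm], by simp, by simp⟩
    | some m0 =>
      rw [hm] at h
      by_cases hlt : key m0 < key x
      · obtain rfl : x = m := by simpa [hlt] using h
        exact ⟨l, [], rfl, fun y hy => lt_of_le_of_lt (PySem.List.max?_isMax hm y hy) hlt,
          by simp⟩
      · obtain rfl : m0 = m := by simpa [hlt] using h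
        obtain ⟨l1, l2, rfl, h1, h2⟩ := ih _ hm
        refine ⟨l1, l2 ++ [x], by simp, h1, ?_⟩
        intro z hz
        rcases List.mem_append.mp hz with hz | hz
        · exact h2 z hz
        · obtain rfl : z = x := by simpa using hz
          exact le_of_not_gt hlt

lemma pvB_inv (ys : List ((Int × Int) × Int)) (h80 : ∀ kv ∈ ys, 80 ≤ kv.2) :
    ys.foldl (fun st kv => pvStepB st kv.1.1 kv.1.2 kv.2) (none, none, 0) = pvBState ys := by
  revert h80
  induction ys using List.reverseRecOn with
  | nil => intro _; rfl
  | append_singleton ys kv ih =>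
    intro h80
    have h80' : ∀ p ∈ ys, (80 : Int) ≤ p.2 := fun p hp => h80 p (by simp [hp])
    have hk : (80 : Int) ≤ kv.2 := h80 kv (by simp)
    have hnl : ¬ kv.2 < 80 := not_lt.mpr hk
    rw [List.foldl_append, List.foldl_cons, List.foldl_nil, ih h80']
    cases hm : PySem.List.max? ys (fun p => p.2) with
    | none =>
      obtain rfl : ys = [] := (PySem.List.max?_eq_none_iff ys _).mp hm
      simp [pvStepB, pvBState, hnl, PySem.List.max?]
    | some w =>
      have hmax : ∀ y ∈ ys, y.2 ≤ w.2 := PySem.List.max?_isMax hm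
      have hwm : w ∈ ys := PySem.List.max?_mem hm
      have hsnd : PySem.List.max? (ys.map Prod.snd) (fun v => v)
          = some w.2 := by
        rw [pvMax?_map]; rw [hm]; rfl
      unfold pvBState
      rw [pvMax?_append, hm]
      dsimp only
      by_cases hgt : kv.2 > w.2
      · have hne : kv.2 ∉ ys.map Prod.snd := by
          intro hmem
          obtain ⟨y, hy, hy2⟩ := List.mem_map.mp hmem
          exact absurd (hy2 ▸ hmax y hy) (not_le.mpr hgt)
        rw [if_pos hgt]
        have herase : ((ys ++ [kv]).map Prod.snd).erase kv.2 = ys.map Prod.snd := by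
          rw [List.map_append, List.erase_append_right _ hne]
          simp
        simp only [pvStepB, if_neg hnl, if_pos hgt, herase, hsnd]
        simp
      · rw [if_neg hgt]
        have hwmem : w.2 ∈ ys.map Prod.snd := List.mem_map.mpr ⟨w, hwm, rfl⟩
        have herase : ((ys ++ [kv]).map Prod.snd).erase w.2
            = (ys.map Prod.snd).erase w.2 ++ [kv.2] := by
          rw [List.map_append, List.erase_append_left _ hwmem]; simp
        dsimp only
        rw [herase, pvMax?_append]
        cases hs : PySem.List.max? ((ys.map Prod.snd).erase w.2) (fun v => v) with
        | none => simp only [pvStepB, if_neg hnl, if_neg hgt]; simp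
        | some s0 =>
          simp only [pvStepB, if_neg hnl, if_neg hgt]
          by_cases hds : kv.2 > s0
          · simp [hds]
          · simp [hds]

lemma pvMain (xs : List ((Int × Int) × Int)) (hnd : (xs.map Prod.fst).Nodup) :
    pvAfold xs = pvBfold xs := by
  have hysnd : ((xs.filter (fun kv => decide ((80:Int) ≤ kv.2))).map Prod.fst).Nodup :=
    ((List.filter_sublist).map Prod.fst).nodup hnd
  have h80 : ∀ kv ∈ xs.filter (fun kv => decide ((80:Int) ≤ kv.2)), (80:Int) ≤ kv.2 :=
    fun kv h => by simpa using List.of_mem_filter h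
  have hBloop : xs.foldl (fun st kv => pvStepB st kv.1.1 kv.1.2 kv.2) (none, none, 0)
      = (xs.filter (fun kv => decide ((80:Int) ≤ kv.2))).foldl
          (fun st kv => pvStepB st kv.1.1 kv.1.2 kv.2) (none, none, 0) := by
    rw [PySem.List.foldl_congr_mem xs _
        (fun st kv => if (80:Int) ≤ kv.2 then pvStepB st kv.1.1 kv.1.2 kv.2 else st) _
        (fun acc x _ => by
          by_cases h : (80:Int) ≤ x.2
          · simp [h]
          · simp [pvStepB, not_le.mp h])]
    exact PySem.List.foldl_ite_eq_foldl_filter _ _ _ _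
  simp only [pvAfold, pvBfold]
  rw [hBloop, pvB_inv _ h80,
      PySem.List.foldl_ite_eq_foldl_filter (fun (kv : (Int × Int) × Int) => (80:Int) ≤ kv.2)
        (fun fl kv => fl.insert kv.1 kv.2) xs PySem.Dict.empty]
  set ys := xs.filter (fun kv => decide ((80:Int) ≤ kv.2)) with hysdef
  set flat := ys.foldl (fun fl kv => fl.insert kv.1 kv.2)
      (PySem.Dict.empty : PySem.Dict (Int × Int) Int) with hflatdef
  have hitems : flat.items = ys := by
    rw [hflatdef, PySem.Dict.items_foldl_insert_fresh ys Prod.fst Prod.snd _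
        (fun a _ => PySem.Dict.contains_empty _) hysnd]
    simp [PySem.Dict.empty]
  have hkeys : flat.keys = ys.map Prod.fst := by
    simp only [PySem.Dict.keys, hitems]
  have hsize : flat.size = ys.length := by
    simp only [PySem.Dict.size, hitems]
  have hget : ∀ kv ∈ ys, flat.getD kv.1 0 = kv.2 := by
    intro kv h
    exact PySem.Dict.getD_of_mem_items flat (by rw [hitems]; simpa using h)
      (by rw [hkeys]; exact hysnd) 0
  cases hm : PySem.List.max? ys (fun kv => kv.2) with
  | none =>
    obtain hnil : ys = [] := (PySem.List.max?_eq_none_iff ys _).mp hm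
    rw [hnil] at hsize
    simp [hsize, pvBState, hm]
  | some w =>
    have hw : w ∈ ys := PySem.List.max?_mem hm
    obtain ⟨l1, l2, hdec, hl1, hl2⟩ := pvMax?_decomp _ _ _ hm
    have hsize' : ¬ flat.size = 0 := by rw [hsize, hdec]; simp
    have hkeymax : PySem.List.max? flat.keys (fun k => flat.getD k 0) = some w.1 := by
      rw [hkeys, pvMax?_map Prod.fst (fun k => flat.getD k 0) ys,
          pvMax?_congr (fun x => flat.getD x.1 0) (fun x => x.2) ys
            (fun x hx => hget x hx), hm]
      rfl
    have hwd : flat.getD w.1 0 = w.2 := hget w hw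
    -- key uniqueness along the decomposition
    have hnd' : (l1.map Prod.fst ++ w.1 :: l2.map Prod.fst).Nodup := by
      have := hysnd
      rw [hdec] at this
      simpa using this
    have hl1ne : ∀ x ∈ l1, x.1 ≠ w.1 := by
      intro x hx hxe
      have : w.1 ∈ l1.map Prod.fst := hxe ▸ List.mem_map.mpr ⟨x, hx, rfl⟩
      exact (List.disjoint_of_nodup_append hnd' this) (by simp)
    have hl2ne : ∀ x ∈ l2, x.1 ≠ w.1 := by
      intro x hx hxe
      have hmem : w.1 ∈ l2.map Prod.fst := hxe ▸ List.mem_map.mpr ⟨x, hx, rfl⟩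
      exact (List.nodup_cons.mp (List.nodup_append.mp hnd').2.1).1 hmem
    have hothers : ys.filter (fun kv => decide (kv.1 ≠ w.1)) = l1 ++ l2 := by
      rw [hdec, List.filter_append, List.filter_cons]
      simp only [ne_eq, not_true_eq_false, decide_false, Bool.false_eq_true, if_false]
      rw [List.filter_eq_self.mpr (fun x hx => by simpa using hl1ne x hx),
          List.filter_eq_self.mpr (fun x hx => by simpa using hl2ne x hx)]
    have hl1v : ∀ v ∈ l1.map Prod.snd, v < w.2 := by
      intro v hv; obtain ⟨x, hx, rfl⟩ := List.mem_map.mp hv; exact hl1 x hx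
    have herase : (ys.map Prod.snd).erase w.2 = (l1 ++ l2).map Prod.snd := by
      rw [hdec, List.map_append, List.map_cons,
          List.erase_append_right _ (fun h => lt_irrefl _ (hl1v _ h)),
          List.erase_cons_head, ← List.map_append]
    simp only [pvBState]
    rw [hm]
    dsimp only
    rw [if_neg hsize', hkeymax]
    dsimp only
    rw [hitems, hwd, hothers, herase]
    by_cases hE : l1 ++ l2 = []
    · have hlen : ys.length = 1 := by rw [hdec]; rcases List.append_eq_nil_iff.mp hE with ⟨rfl, rfl⟩; simp
      rw [hE]
      have hs : PySem.List.max? (([] : List ((Int × Int) × Int)).map Prod.snd) (fun v => v) = none := rfl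
      rw [hs]
      simp [hlen]
    · have hlen2 : 2 ≤ ys.length := by
        have hne : 0 < (l1 ++ l2).length := List.length_pos_iff.mpr hE
        rw [hdec]
        simp only [List.length_append, List.length_cons] at hne ⊢
        omega
      cases hs : PySem.List.max? ((l1 ++ l2).map Prod.snd) (fun v => v) with
      | none =>
        exact absurd (by simpa using (PySem.List.max?_eq_none_iff _ _).mp hs) hE
      | some s0 =>
        have hs0mem : s0 ∈ (l1 ++ l2).map Prod.snd := PySem.List.max?_mem hs
        have hs0max : ∀ v ∈ (l1 ++ l2).map Prod.snd, v ≤ s0 := PySem.List.max?_isMax hs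
        have hlen0 : ¬ ((ys.length : Int) = 0) := by omega
        have hlen1 : ¬ ((ys.length : Int) = 1) := by omega
        rw [if_neg hlen0]
        dsimp only
        rw [if_neg hlen1]
        have hall : ((l1 ++ l2).all (fun kv => decide (w.2 > kv.2 + 60)) = true) ↔ w.2 > s0 + 60 := by
          constructor
          · intro h
            obtain ⟨x, hx, rfl⟩ := List.mem_map.mp hs0mem
            simpa using (List.all_eq_true.mp h x hx)
          · refine fun h => List.all_eq_true.mpr (fun x hx => ?_)
            have : x.2 ≤ s0 := hs0max x.2 (List.mem_map.mpr ⟨x, hx, rfl⟩)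
            simp only [gt_iff_lt, decide_eq_true_eq]
            omega
        by_cases hc : w.2 > s0 + 60
        · rw [if_pos (hall.mpr hc), if_pos hc]
        · rw [if_neg (fun h => hc (hall.mp h)), if_neg hc]


-- ===== VERDICT (by name: the statement is the Claim_ definition above) =====
set_option maxHeartbeats 2000000 in
theorem dominant_zone_spec : Claim_equal_dominant_zone := by
  intro deltas _ _
  show dominant_zone deltas = dominant_zone_alt deltas
  have hA : dominant_zone deltas = pvAfold (pvCells deltas) := rfl
  have hB : dominant_zone_alt deltas = pvBfold (pvCells deltas) := rfl
  rw [hA, hB]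
  refine pvMain _ ?_
  have h : (pvCells deltas).map Prod.fst
      = [((0 : Int), (0 : Int)), (0, 1), (0, 2), (1, 0), (1, 1), (1, 2), (2, 0), (2, 1), (2, 2)] := rfl
  rw [h]; decide
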